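-- pv_equiv track=rewrite | github.com/PierreVieira/URI | Python/Strings/1607 - Avance as Letras.py | caminhadas
-- ===== SOURCE A (Python) =====
-- def caminhadas(char1, char2):
--     """
--     Calcula o tanto que tenho que andar para que char1 == char2
--     """
--     qtde_andadas = 0
--     letras = 'abcdefghijklmnopqrstuvwxyz'
--     while char1 != char2:
--         posicao = letras.index(char1) + 1
--         if posicao == 26:
--             posicao = 0
--         char1 = letras[posicao]
--         qtde_andadas += 1
--     return qtde_andadas
-- ===== SOURCE B (Python) =====
-- def caminhadas(char1, char2):
--     if char1 == char2:
--         return 0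
--     return (ord(char2) - ord(char1)) % 26
-- ===== Notes on version B (the rewrite author's own statement) =====
-- stated objective: simpler
-- what changed: Replaced the letter-by-letter stepping loop (advance char1 through the alphabet, counting) with the closed-form cyclic distance (ord(char2) - ord(char1)) % 26 (0 when the strings are already equal).
-- outside the precondition, e.g. on caminhadas('ab', 'c'): A returns 2, B raises TypeError
import Mathlib
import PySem

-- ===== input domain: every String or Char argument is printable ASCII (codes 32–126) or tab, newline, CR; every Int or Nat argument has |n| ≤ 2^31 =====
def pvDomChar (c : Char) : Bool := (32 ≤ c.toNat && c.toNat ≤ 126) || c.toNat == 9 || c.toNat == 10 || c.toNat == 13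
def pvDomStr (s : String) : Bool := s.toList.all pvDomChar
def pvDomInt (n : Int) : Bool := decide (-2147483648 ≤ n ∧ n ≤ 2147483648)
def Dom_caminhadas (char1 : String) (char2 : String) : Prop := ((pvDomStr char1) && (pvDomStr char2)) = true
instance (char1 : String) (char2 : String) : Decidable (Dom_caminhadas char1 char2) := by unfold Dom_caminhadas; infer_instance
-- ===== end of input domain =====

-- B replaces A's letter-stepping loop by the closed-form cyclic distance (ord(char2)-ord(char1)) % 26: simpler, one arithmetic expression.
-- ===== PORT A =====
def pvLetras : String := "abcdefghijklmnopqrstuvwxyz"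

-- while char1 != char2: posicao = letras.index(char1)+1; if posicao == 26: posicao = 0; char1 = letras[posicao]; qtde += 1
-- fuel only makes the loop total; inside Pre_ at most 26 iterations are ever needed (outside Pre_ Python A raises or diverges).
def caminhadasLoop : Nat → String → String → Int → Int
  | 0, _, _, qtde_andadas => qtde_andadas
  | fuel + 1, char1, char2, qtde_andadas =>
    if char1 = char2 then qtde_andadas
    else
      let posicao := PySem.Str.find pvLetras char1 + 1   -- letras.index(char1) + 1; find = -1 means ValueError (outside Pre_)
      let posicao := if posicao = 26 then 0 else posicao
      match PySem.Str.pyGet? pvLetras posicao with       -- letras[posicao]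
      | some c => caminhadasLoop fuel (String.singleton c) char2 (qtde_andadas + 1)
      | none => qtde_andadas                              -- IndexError; unreachable inside Pre_

def caminhadas (char1 : String) (char2 : String) : Int := caminhadasLoop 32 char1 char2 0

-- ===== PORT B =====
-- ord(s): code point of a length-1 string; a non-length-1 argument is a Python TypeError (outside Pre_), 0 here.
def pvOrd (s : String) : Int :=
  match s.toList with
  | [c] => (c.toNat : Int)
  | _ => 0

def caminhadas_alt (char1 : String) (char2 : String) : Int :=
  if char1 = char2 then 0
  else PySem.Int.mod (pvOrd char2 - pvOrd char1) 26

-- ===== PRECONDITION & SPEC =====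
def pvLowerStrings : List String :=
  ["a","b","c","d","e","f","g","h","i","j","k","l","m",
   "n","o","p","q","r","s","t","u","v","w","x","y","z"]

-- Pre_ excludes unequal pairs outside single lowercase letters: there A raises ValueError or loops forever,
-- or (char1 a multi-character substring of the alphabet, e.g. "ab") A returns a count while B's ord() raises TypeError.
def Pre_caminhadas (char1 : String) (char2 : String) : Prop :=
  char1 = char2 ∨ (char1 ∈ pvLowerStrings ∧ char2 ∈ pvLowerStrings)
instance (char1 : String) (char2 : String) : Decidable (Pre_caminhadas char1 char2) := by
  unfold Pre_caminhadas; infer_instance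

def pvWitness_caminhadas : String × String := ("a", "c")

def Spec_caminhadas (char1 : String) (char2 : String) (out : Int) : Prop := out = caminhadas_alt char1 char2
instance (char1 : String) (char2 : String) (out : Int) : Decidable (Spec_caminhadas char1 char2 out) := by unfold Spec_caminhadas; infer_instance

-- ===== CLAIM (what is proved, stated in full; the proofs are below) =====
def Claim_equal_caminhadas : Prop := ∀ (char1 : String) (char2 : String), Dom_caminhadas char1 char2 → Pre_caminhadas char1 char2 → Spec_caminhadas char1 char2 (caminhadas char1 char2)

-- ===== LEMMAS AND PROOFS =====
-- All 26 × 26 lowercase-letter pairs agree: checked by kernel evaluation of both ports.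
theorem pv_key : ∀ s1 ∈ pvLowerStrings, ∀ s2 ∈ pvLowerStrings,
    caminhadas s1 s2 = caminhadas_alt s1 s2 := by decide

theorem pv_equal_case (s : String) : caminhadas s s = 0 := by
  simp [caminhadas, caminhadasLoop]

theorem pv_alt_equal_case (s : String) : caminhadas_alt s s = 0 := by
  simp [caminhadas_alt]

-- ===== VERDICT (by name: the statement is the Claim_ definition above) =====
theorem caminhadas_spec : Claim_equal_caminhadas := by
  intro char1 char2 _ hpre
  unfold Spec_caminhadas
  rcases hpre with heq | ⟨h1, h2⟩
  · subst heq
    rw [pv_equal_case, pv_alt_equal_case]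
  · exact pv_key _ h1 _ h2
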